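-- pv_equiv track=rewrite | github.com/AB-Law/Pluck-It | PluckIt.Processor/agents/tools/wardrobe.py | _extract_filter_terms
-- ===== SOURCE A (Python) =====
-- from collections.abc import Iterable
--
-- _CATEGORY_ALIASES = {
--     "top": "tops",
--     "tops": "tops",
--     "topwear": "tops",
--     "tee": "tops",
--     "tees": "tops",
--     "tshirt": "tops",
--     "t-shirt": "tops",
--     "bottom": "bottoms",
--     "bottoms": "bottoms",
--     "pant": "bottoms",
--     "pants": "bottoms",
--     "trouser": "bottoms",
--     "trousers": "bottoms",
--     "legging": "bottoms",
--     "leggings": "bottoms",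
--     "shoe": "shoes",
--     "shoes": "shoes",
--     "sock": "accessories",
--     "socks": "accessories",
--     "outer": "outerwear",
--     "outerwear": "outerwear",
--     "outerware": "outerwear",
--     "accessory": "accessories",
--     "accessories": "accessories",
-- }
--
-- _CONDITION_ALIASES = {"new", "excellent", "good", "fair", "brandnew"}
--
-- _FILTER_NOISE_WORDS = {
--     "a",
--     "and",
--     "an",
--     "any",
--     "for",
--     "from",
--     "in",
--     "the",
--     "to",
--     "with",
--     "without",
--     "wear",
--     "wearing",
--     "like",
--     "look",
--     "worn",
--     "show",
--     "find",
--     "me",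
--     "my",
--     "i",
--     "need",
-- }
--
-- def _normalise_term(raw: str) -> str:
--     safe = "".join(ch if ch.isalnum() or ch.isspace() else " " for ch in (raw or "").lower())
--     return " ".join(safe.split())
--
-- def _extract_filter_terms(terms: Iterable[str]) -> tuple[list[str], list[str], list[str]]:
--     normalised_terms = (_normalise_term(raw_term) for raw_term in terms)
--     filtered_terms = [term for term in normalised_terms if term]
--
--     category_terms = (
--         _CATEGORY_ALIASES[term]
--         for term in filtered_terms
--         if term in _CATEGORY_ALIASES
--     )
--     condition_terms = (term for term in filtered_terms if term in _CONDITION_ALIASES)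
--     noise_filter = _FILTER_NOISE_WORDS | set(_CATEGORY_ALIASES.keys()) | _CONDITION_ALIASES
--     text_terms = (
--         term for term in filtered_terms
--         if term not in noise_filter and len(term) > 2
--     )
--
--     return (
--         list(dict.fromkeys(category_terms))[:2],
--         list(dict.fromkeys(condition_terms))[:2],
--         list(dict.fromkeys(text_terms))[:2],
--     )
-- ===== SOURCE B (Python) =====
-- _TOPS = ("top", "tops", "topwear", "tee", "tees", "tshirt", "t-shirt")
-- _BOTTOMS = ("bottom", "bottoms", "pant", "pants", "trouser", "trousers", "legging", "leggings")
-- _SHOES = ("shoe", "shoes")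
-- _ACCESSORIES = ("sock", "socks", "accessory", "accessories")
-- _OUTERWEAR = ("outer", "outerwear", "outerware")
--
-- _CONDITIONS = ("new", "excellent", "good", "fair", "brandnew")
--
-- _NOISE = ("a", "and", "an", "any", "for", "from", "in", "the", "to", "with", "without",
--           "wear", "wearing", "like", "look", "worn", "show", "find", "me", "my", "i", "need")
--
--
-- def _normalise_term(raw: str) -> str:
--     # one pass over the characters: alnum chars build the current word,
--     # anything else (space or punctuation alike) terminates it
--     words = []
--     cur = []
--     for ch in (raw or "").lower():
--         if ch.isalnum():
--             cur.append(ch)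
--         else:
--             if cur:
--                 words.append("".join(cur))
--                 cur = []
--     if cur:
--         words.append("".join(cur))
--     return " ".join(words)
--
--
-- def _category_of(term):
--     if term in _TOPS:
--         return "tops"
--     if term in _BOTTOMS:
--         return "bottoms"
--     if term in _SHOES:
--         return "shoes"
--     if term in _ACCESSORIES:
--         return "accessories"
--     if term in _OUTERWEAR:
--         return "outerwear"
--     return None
--
--
-- def _push(bucket, value):
--     # order-preserving dedup with a cap of 2
--     if len(bucket) < 2 and value not in bucket:
--         bucket.append(value)
--
--
-- def _extract_filter_terms(terms):
--     cats, conds, texts = [], [], []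
--     for raw in terms:
--         term = _normalise_term(raw)
--         if not term:
--             continue
--         mapped = _category_of(term)
--         if mapped is not None:
--             _push(cats, mapped)
--         elif term in _CONDITIONS:
--             _push(conds, term)
--         elif term not in _NOISE and len(term) > 2:
--             _push(texts, term)
--     return cats, conds, texts
-- ===== Notes on version B (the rewrite author's own statement) =====
-- stated objective: alternative
-- what changed: A normalises by mapping punctuation to spaces then split/rejoin, and builds three separately filtered streams over the normalised list, deduping/truncating each with dict.fromkeys(...)[:2]; B normalises with a single character scan that assembles words directly (any non-alphanumeric character terminates a word), classifies each term once with an if/elif chain over grouped alias tuples, and fills capped order-preserving buckets in one pass, so the alias dict, the set union and the three dedup dictionaries disappear.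
import Mathlib
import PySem

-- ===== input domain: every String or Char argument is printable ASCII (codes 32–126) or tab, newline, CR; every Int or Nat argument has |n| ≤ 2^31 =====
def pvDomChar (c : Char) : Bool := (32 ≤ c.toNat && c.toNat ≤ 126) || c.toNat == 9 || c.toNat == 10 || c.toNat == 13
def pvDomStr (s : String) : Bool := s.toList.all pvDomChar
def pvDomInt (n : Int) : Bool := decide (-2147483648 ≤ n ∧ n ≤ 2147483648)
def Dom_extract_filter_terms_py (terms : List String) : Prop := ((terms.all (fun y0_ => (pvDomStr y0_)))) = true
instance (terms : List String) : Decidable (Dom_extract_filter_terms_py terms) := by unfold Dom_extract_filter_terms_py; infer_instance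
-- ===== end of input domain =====

-- B replaces A's staged pipeline (replace-then-split normalisation, three dict.fromkeys-deduped
-- filtered streams over an alias dict and noise-set union) with a one-scan word builder for
-- normalisation and a single classifying pass into capped dedup buckets; same value, no speed claim.

-- ===== PORT A =====
-- module constants _CATEGORY_ALIASES, _CONDITION_ALIASES, _FILTER_NOISE_WORDS
def catAliasesPy : PySem.Dict String String := PySem.Dict.ofList
  [("top", "tops"), ("tops", "tops"), ("topwear", "tops"), ("tee", "tops"), ("tees", "tops"),
   ("tshirt", "tops"), ("t-shirt", "tops"),
   ("bottom", "bottoms"), ("bottoms", "bottoms"), ("pant", "bottoms"), ("pants", "bottoms"),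
   ("trouser", "bottoms"), ("trousers", "bottoms"), ("legging", "bottoms"), ("leggings", "bottoms"),
   ("shoe", "shoes"), ("shoes", "shoes"),
   ("sock", "accessories"), ("socks", "accessories"),
   ("outer", "outerwear"), ("outerwear", "outerwear"), ("outerware", "outerwear"),
   ("accessory", "accessories"), ("accessories", "accessories")]

def conditionAliasesPy : PySem.Set String :=
  PySem.Set.ofList ["new", "excellent", "good", "fair", "brandnew"]

def noiseWordsPy : PySem.Set String :=
  PySem.Set.ofList ["a", "and", "an", "any", "for", "from", "in", "the", "to", "with", "without",
                    "wear", "wearing", "like", "look", "worn", "show", "find", "me", "my", "i", "need"]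

-- body of A's per-character comprehension ('ch if ch.isalnum() or ch.isspace() else " "'), named
def mapfA (ch : Char) : Char :=
  if PySem.Chars.isalnum ch || PySem.Chars.isspace ch then ch else ' '

-- A's _normalise_term (exact: PySem.Chars.lower/isalnum/isspace, Str.split₀/join are the Python
-- built-ins; '(raw or "")' equals raw for a string argument — '' or '' is '')
def normalise_term_py (raw : String) : String :=
  let safe := String.ofList ((PySem.Chars.lower raw.toList).map mapfA)
  PySem.Str.join " " (PySem.Str.split₀ safe)

-- _FILTER_NOISE_WORDS | set(_CATEGORY_ALIASES.keys()) | _CONDITION_ALIASES (hoisted constant expression)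
def noiseFilterPy : PySem.Set String :=
  PySem.Set.union (PySem.Set.union noiseWordsPy (PySem.Set.ofList (PySem.Dict.keys catAliasesPy)))
    conditionAliasesPy

-- _CATEGORY_ALIASES[term] under the guard 'term in _CATEGORY_ALIASES': total getD form, KeyError unreachable
def extract_filter_terms_py (terms : List String) : List String × List String × List String :=
  let filteredTerms := (terms.map normalise_term_py).filter (fun t => t != "")
  let categoryTerms := (filteredTerms.filter (fun t => PySem.Dict.contains catAliasesPy t)).map
    (fun t => PySem.Dict.getD catAliasesPy t "")
  let conditionTerms := filteredTerms.filter (fun t => PySem.Set.contains conditionAliasesPy t)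
  let textTerms := filteredTerms.filter
    (fun t => !PySem.Set.contains noiseFilterPy t && PySem.Str.len t > 2)
  ((PySem.List.dedup categoryTerms).take 2,
   (PySem.List.dedup conditionTerms).take 2,
   (PySem.List.dedup textTerms).take 2)

-- ===== PORT B =====
-- B's _normalise_term: one character scan; 'cur' is the word under construction (consed, so
-- reversed — Python appends; ''.join(cur) is cur.reverse here), words are emitted in order
def wordsPy : List Char → List Char → List (List Char)
  | [], cur => if cur.isEmpty then [] else [cur.reverse]
  | c :: rest, cur =>
    if PySem.Chars.isalnum c then wordsPy rest (c :: cur)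
    else if cur.isEmpty then wordsPy rest []
    else cur.reverse :: wordsPy rest []

def normalise_term_alt (raw : String) : String :=
  PySem.Str.join " " ((wordsPy (PySem.Chars.lower raw.toList) []).map String.ofList)

-- B's grouped alias tuples (_TOPS … _OUTERWEAR, _CONDITIONS, _NOISE)
def condTermsB : List String := ["new", "excellent", "good", "fair", "brandnew"]

def noiseTermsB : List String :=
  ["a", "and", "an", "any", "for", "from", "in", "the", "to", "with", "without",
   "wear", "wearing", "like", "look", "worn", "show", "find", "me", "my", "i", "need"]

-- B's _category_of: if/elif membership chain over the grouped tuples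
def categoryOfAlt (t : String) : Option String :=
  if ["top", "tops", "topwear", "tee", "tees", "tshirt", "t-shirt"].contains t then some "tops"
  else if ["bottom", "bottoms", "pant", "pants", "trouser", "trousers", "legging",
           "leggings"].contains t then some "bottoms"
  else if ["shoe", "shoes"].contains t then some "shoes"
  else if ["sock", "socks", "accessory", "accessories"].contains t then some "accessories"
  else if ["outer", "outerwear", "outerware"].contains t then some "outerwear"
  else none

-- B's _push(bucket, value): append keeping order-preserving dedup and a cap of 2
def pushPy (bucket : List String) (value : String) : List String :=
  if bucket.length < 2 && !bucket.contains value then bucket ++ [value] else bucket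

-- loop body of B (classification of one non-empty normalised term)
def classifyPy (st : List String × List String × List String) (term : String) :
    List String × List String × List String :=
  match categoryOfAlt term with
  | some mapped => (pushPy st.1 mapped, st.2.1, st.2.2)
  | none =>
    if condTermsB.contains term then (st.1, pushPy st.2.1 term, st.2.2)
    else if !noiseTermsB.contains term && PySem.Str.len term > 2 then
      (st.1, st.2.1, pushPy st.2.2 term)
    else st

def extract_filter_terms_py_alt (terms : List String) : List String × List String × List String :=
  terms.foldl (fun st raw =>
    let term := normalise_term_alt raw
    if term == "" then st else classifyPy st term) ([], [], [])

-- ===== PRECONDITION & SPEC =====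
def Spec_extract_filter_terms_py (terms : List String) (out : List String × List String × List String) : Prop := out = extract_filter_terms_py_alt terms
instance (terms : List String) (out : List String × List String × List String) : Decidable (Spec_extract_filter_terms_py terms out) := by unfold Spec_extract_filter_terms_py; infer_instance

-- ===== CLAIM (what is proved, stated in full; the proofs are below) =====
def Claim_equal_extract_filter_terms_py : Prop := ∀ (terms : List String), Dom_extract_filter_terms_py terms → Spec_extract_filter_terms_py terms (extract_filter_terms_py terms)

-- ===== LEMMAS AND PROOFS =====

-- B's normalisation equals A's: char classes first
lemma isalnum_not_isspace (c : Char) (h : PySem.Chars.isalnum c = true) :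
    PySem.Chars.isspace c = false := by
  simp only [PySem.Chars.isalnum, PySem.Chars.isalpha, PySem.Chars.isdigit, PySem.Chars.isupper,
    PySem.Chars.islower, PySem.Chars.isspace, Bool.or_eq_true, Bool.and_eq_true,
    decide_eq_true_eq, Char.le_def, UInt32.le_iff_toNat_le, Bool.or_eq_false_iff,
    Bool.and_eq_false_iff, decide_eq_false_iff_not, not_le,
    show ('A').val.toNat = 65 from rfl, show ('Z').val.toNat = 90 from rfl,
    show ('a').val.toNat = 97 from rfl, show ('z').val.toNat = 122 from rfl,
    show ('0').val.toNat = 48 from rfl, show ('9').val.toNat = 57 from rfl,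
    Char.toNat] at *
  omega

-- splitting the mapped string on whitespace IS B's word scan (non-alnum chars all become separators)
lemma go_eq_wordsPy (cs : List Char) (cur : List Char) (acc : List (List Char)) :
    PySem.Chars.split₀.go (cs.map mapfA) cur acc = acc.reverse ++ wordsPy cs cur := by
  induction cs generalizing cur acc with
  | nil =>
    simp only [List.map_nil, PySem.Chars.split₀.go, wordsPy]
    by_cases h : cur.isEmpty <;> simp [h]
  | cons c cs ih =>
    rw [List.map_cons]
    by_cases ha : PySem.Chars.isalnum c
    · have h1 : mapfA c = c := by simp [mapfA, ha]
      have hs := isalnum_not_isspace c ha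
      rw [h1]
      simp only [PySem.Chars.split₀.go, hs, Bool.false_eq_true, if_false, ih]
      simp only [wordsPy, ha, if_true]
    · have hsp : PySem.Chars.isspace (mapfA c) = true := by
        by_cases h : PySem.Chars.isspace c
        · simp [mapfA, ha, h]
        · simp [mapfA, ha, h]; decide
      simp only [PySem.Chars.split₀.go, hsp, if_true]
      by_cases hc : cur.isEmpty
      · rw [if_pos hc, ih]
        simp only [wordsPy, ha, Bool.false_eq_true, if_false, hc, if_true]
      · rw [if_neg hc, ih]
        simp only [wordsPy, ha, Bool.false_eq_true, if_false, hc, if_false,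
          List.reverse_cons, List.append_assoc, List.singleton_append]

lemma normalise_alt_eq (raw : String) : normalise_term_alt raw = normalise_term_py raw := by
  simp only [normalise_term_alt, normalise_term_py, PySem.Str.split₀, String.toList_ofList,
    PySem.Chars.split₀, go_eq_wordsPy, List.reverse_nil, List.nil_append]

-- B's membership chain computes A's dict lookup
lemma catOf_eq (t : String) : categoryOfAlt t = PySem.Dict.get? catAliasesPy t := by
  by_cases hmem : t ∈ ["top", "tops", "topwear", "tee", "tees", "tshirt", "t-shirt",
    "bottom", "bottoms", "pant", "pants", "trouser", "trousers", "legging", "leggings",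
    "shoe", "shoes", "sock", "socks", "outer", "outerwear", "outerware", "accessory", "accessories"]
  · fin_cases hmem <;> decide
  · simp only [List.mem_cons, List.not_mem_nil, or_false, not_or] at hmem
    obtain ⟨n1,n2,n3,n4,n5,n6,n7,n8,n9,n10,n11,n12,n13,n14,n15,n16,n17,n18,n19,n20,n21,n22,n23,n24⟩ := hmem
    have hitems : catAliasesPy.items =
      [("top", "tops"), ("tops", "tops"), ("topwear", "tops"), ("tee", "tops"), ("tees", "tops"),
       ("tshirt", "tops"), ("t-shirt", "tops"),
       ("bottom", "bottoms"), ("bottoms", "bottoms"), ("pant", "bottoms"), ("pants", "bottoms"),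
       ("trouser", "bottoms"), ("trousers", "bottoms"), ("legging", "bottoms"), ("leggings", "bottoms"),
       ("shoe", "shoes"), ("shoes", "shoes"),
       ("sock", "accessories"), ("socks", "accessories"),
       ("outer", "outerwear"), ("outerwear", "outerwear"), ("outerware", "outerwear"),
       ("accessory", "accessories"), ("accessories", "accessories")] := by decide
    have hA : categoryOfAlt t = none := by
      simp [categoryOfAlt, n1,n2,n3,n4,n5,n6,n7,n8,n9,n10,n11,n12,n13,n14,n15,n16,n17,n18,n19,n20,n21,n22,n23,n24]
    have b1 : (("top" : String) == t) = false := beq_eq_false_iff_ne.mpr (Ne.symm n1)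
    have b2 : (("tops" : String) == t) = false := beq_eq_false_iff_ne.mpr (Ne.symm n2)
    have b3 : (("topwear" : String) == t) = false := beq_eq_false_iff_ne.mpr (Ne.symm n3)
    have b4 : (("tee" : String) == t) = false := beq_eq_false_iff_ne.mpr (Ne.symm n4)
    have b5 : (("tees" : String) == t) = false := beq_eq_false_iff_ne.mpr (Ne.symm n5)
    have b6 : (("tshirt" : String) == t) = false := beq_eq_false_iff_ne.mpr (Ne.symm n6)
    have b7 : (("t-shirt" : String) == t) = false := beq_eq_false_iff_ne.mpr (Ne.symm n7)
    have b8 : (("bottom" : String) == t) = false := beq_eq_false_iff_ne.mpr (Ne.symm n8)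
    have b9 : (("bottoms" : String) == t) = false := beq_eq_false_iff_ne.mpr (Ne.symm n9)
    have b10 : (("pant" : String) == t) = false := beq_eq_false_iff_ne.mpr (Ne.symm n10)
    have b11 : (("pants" : String) == t) = false := beq_eq_false_iff_ne.mpr (Ne.symm n11)
    have b12 : (("trouser" : String) == t) = false := beq_eq_false_iff_ne.mpr (Ne.symm n12)
    have b13 : (("trousers" : String) == t) = false := beq_eq_false_iff_ne.mpr (Ne.symm n13)
    have b14 : (("legging" : String) == t) = false := beq_eq_false_iff_ne.mpr (Ne.symm n14)
    have b15 : (("leggings" : String) == t) = false := beq_eq_false_iff_ne.mpr (Ne.symm n15)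
    have b16 : (("shoe" : String) == t) = false := beq_eq_false_iff_ne.mpr (Ne.symm n16)
    have b17 : (("shoes" : String) == t) = false := beq_eq_false_iff_ne.mpr (Ne.symm n17)
    have b18 : (("sock" : String) == t) = false := beq_eq_false_iff_ne.mpr (Ne.symm n18)
    have b19 : (("socks" : String) == t) = false := beq_eq_false_iff_ne.mpr (Ne.symm n19)
    have b20 : (("outer" : String) == t) = false := beq_eq_false_iff_ne.mpr (Ne.symm n20)
    have b21 : (("outerwear" : String) == t) = false := beq_eq_false_iff_ne.mpr (Ne.symm n21)
    have b22 : (("outerware" : String) == t) = false := beq_eq_false_iff_ne.mpr (Ne.symm n22)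
    have b23 : (("accessory" : String) == t) = false := beq_eq_false_iff_ne.mpr (Ne.symm n23)
    have b24 : (("accessories" : String) == t) = false := beq_eq_false_iff_ne.mpr (Ne.symm n24)
    have hB : PySem.Dict.get? catAliasesPy t = none := by
      simp [PySem.Dict.get?, hitems, b1, b2, b3, b4, b5, b6, b7, b8, b9, b10, b11, b12, b13, b14,
        b15, b16, b17, b18, b19, b20, b21, b22, b23, b24]
    rw [hA, hB]

-- B's tuple memberships compute A's set memberships (the literal lists are duplicate-free)
lemma cond_eq (t : String) : condTermsB.contains t = PySem.Set.contains conditionAliasesPy t := by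
  have h : conditionAliasesPy = condTermsB := by decide
  rw [h]; rfl

lemma noise_eq (t : String) : noiseTermsB.contains t = PySem.Set.contains noiseWordsPy t := by
  have h : noiseWordsPy = noiseTermsB := by decide
  rw [h]; rfl

-- keep-first dedup of xs relative to an already-seen prefix
def dedupFrom (seen : List String) : List String → List String
  | [] => []
  | x :: xs => if x ∈ seen then dedupFrom seen xs else x :: dedupFrom (seen ++ [x]) xs

lemma append_dedupFrom (xs seen : List String) :
    seen ++ dedupFrom seen xs = PySem.Set.update seen xs := by
  induction xs generalizing seen with
  | nil => simp [dedupFrom, PySem.Set.update]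
  | cons x xs ih =>
    by_cases hx : x ∈ seen
    · have hadd : PySem.Set.add seen x = seen := by simp [PySem.Set.add, PySem.Set.contains, hx]
      simp [dedupFrom, hx, PySem.Set.update, List.foldl,
        (by simpa [PySem.Set.update] using ih seen : seen ++ dedupFrom seen xs = PySem.Set.update seen xs)]
    · have hadd : PySem.Set.add seen x = seen ++ [x] := by
        simp [PySem.Set.add, PySem.Set.contains, hx]
      calc seen ++ dedupFrom seen (x :: xs) = (seen ++ [x]) ++ dedupFrom (seen ++ [x]) xs := by
            simp [dedupFrom, hx]
        _ = PySem.Set.update (seen ++ [x]) xs := ih _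
        _ = PySem.Set.update seen (x :: xs) := by simp [PySem.Set.update, List.foldl, hadd]

lemma foldl_pushPy (xs : List String) (c : List String) (hc : c.length ≤ 2) :
    xs.foldl pushPy c = (c ++ dedupFrom c xs).take 2 := by
  induction xs generalizing c with
  | nil => simp [List.foldl, dedupFrom, List.take_of_length_le hc]
  | cons x xs ih =>
    by_cases hx : x ∈ c
    · have hp : pushPy c x = c := by simp [pushPy, hx]
      simp only [List.foldl, hp, dedupFrom, if_pos hx]
      exact ih c hc
    · by_cases hl : c.length < 2
      · have hp : pushPy c x = c ++ [x] := by simp [pushPy, hx, hl]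
        have h2 : (c ++ [x]).length ≤ 2 := by simp; omega
        simp only [List.foldl, hp, dedupFrom, if_neg hx]
        rw [ih (c ++ [x]) h2]; simp
      · have hlen : c.length = 2 := by omega
        have hp : pushPy c x = c := by simp [pushPy, hl]
        have htake : ∀ r : List String, (c ++ r).take 2 = c := by
          intro r; rw [List.take_append_of_le_length (by omega), List.take_of_length_le (by omega)]
        simp only [List.foldl, hp, dedupFrom, if_neg hx]
        rw [ih c hc, htake, htake]

lemma foldl_pushPy_nil (xs : List String) :
    xs.foldl pushPy [] = (PySem.List.dedup xs).take 2 := by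
  rw [foldl_pushPy xs [] (by simp)]
  have h := append_dedupFrom xs []
  simp only [List.nil_append] at h
  rw [h, PySem.Set.update_nil_left, PySem.List.dedup_eq_ofList]; simp

-- per-term classification facts
lemma cat_not_cond (t : String) (h : PySem.Dict.contains catAliasesPy t = true) :
    PySem.Set.contains conditionAliasesPy t = false := by
  have hall : (PySem.Dict.keys catAliasesPy).all
      (fun k => !PySem.Set.contains conditionAliasesPy k) = true := by decide
  rw [PySem.Dict.contains_eq_decide_mem_keys] at h
  have hmem : t ∈ PySem.Dict.keys catAliasesPy := by simpa using h
  have := List.all_eq_true.mp hall t hmem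
  simpa using this

lemma cat_noise (t : String) (h : PySem.Dict.contains catAliasesPy t = true) :
    PySem.Set.contains noiseFilterPy t = true := by
  rw [PySem.Dict.contains_eq_decide_mem_keys] at h
  have hmem : t ∈ PySem.Dict.keys catAliasesPy := by simpa using h
  rw [PySem.Set.contains_iff, noiseFilterPy, PySem.Set.mem_union, PySem.Set.mem_union]
  exact Or.inl (Or.inr ((PySem.Set.mem_ofList _ t).mpr hmem))

lemma cond_noise (t : String) (h : PySem.Set.contains conditionAliasesPy t = true) :
    PySem.Set.contains noiseFilterPy t = true := by
  rw [PySem.Set.contains_iff] at h ⊢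
  rw [noiseFilterPy, PySem.Set.mem_union]
  exact Or.inr h

lemma noise_of_not_cat_cond (t : String) (h1 : PySem.Dict.contains catAliasesPy t = false)
    (h2 : PySem.Set.contains conditionAliasesPy t = false) :
    PySem.Set.contains noiseFilterPy t = PySem.Set.contains noiseWordsPy t := by
  rw [PySem.Dict.contains_eq_decide_mem_keys] at h1
  have hk : t ∉ PySem.Dict.keys catAliasesPy := by simpa using h1
  have hc : t ∉ conditionAliasesPy := by
    intro hm; rw [(PySem.Set.contains_iff _ t).mpr hm] at h2; simp at h2
  have hiff : PySem.Set.contains noiseFilterPy t = true ↔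
      PySem.Set.contains noiseWordsPy t = true := by
    rw [PySem.Set.contains_iff, PySem.Set.contains_iff, noiseFilterPy, PySem.Set.mem_union,
      PySem.Set.mem_union, PySem.Set.mem_ofList]
    constructor
    · rintro ((h | h) | h)
      · exact h
      · exact absurd h hk
      · exact absurd h hc
    · exact fun h => Or.inl (Or.inl h)
  cases hB : PySem.Set.contains noiseWordsPy t
  · rw [← Bool.not_eq_true] at hB ⊢; intro hA; exact hB (hiff.mp hA)
  · exact hiff.mpr hB

-- the single classification pass is the triple of independent bucket folds
lemma foldl_classify (l : List String) (c1 c2 c3 : List String) :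
    l.foldl classifyPy (c1, c2, c3) =
      (((l.filter (fun t => PySem.Dict.contains catAliasesPy t)).map
          (fun t => PySem.Dict.getD catAliasesPy t "")).foldl pushPy c1,
       (l.filter (fun t => PySem.Set.contains conditionAliasesPy t)).foldl pushPy c2,
       (l.filter (fun t => !PySem.Set.contains noiseFilterPy t && PySem.Str.len t > 2)).foldl pushPy c3) := by
  induction l generalizing c1 c2 c3 with
  | nil => simp [List.foldl, List.filter]
  | cons t l ih =>
    have hcat := catOf_eq t
    cases hg : PySem.Dict.get? catAliasesPy t with
    | some m =>
      have hg' : categoryOfAlt t = some m := hcat.trans hg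
      have hc : PySem.Dict.contains catAliasesPy t = true := by
        rw [PySem.Dict.contains_eq_isSome_get?, hg]; rfl
      have hgd : PySem.Dict.getD catAliasesPy t "" = m := by
        simp [PySem.Dict.getD, hg]
      have hcond := cat_not_cond t hc
      have hnoise := cat_noise t hc
      simp only [List.foldl, List.filter, classifyPy, hg', hc, hcond, hnoise, hgd,
        Bool.not_true, Bool.false_and, List.map]
      exact ih _ _ _
    | none =>
      have hg' : categoryOfAlt t = none := hcat.trans hg
      have hc : PySem.Dict.contains catAliasesPy t = false := by
        rw [PySem.Dict.contains_eq_isSome_get?, hg]; rfl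
      cases hcond : PySem.Set.contains conditionAliasesPy t with
      | true =>
        have hcond' : condTermsB.contains t = true := (cond_eq t).trans hcond
        have hnoise := cond_noise t hcond
        simp only [List.foldl, List.filter, classifyPy, hg', hc, hcond, hcond', hnoise,
          Bool.not_true, Bool.false_and, if_true]
        exact ih _ _ _
      | false =>
        have hcond' : condTermsB.contains t = false := (cond_eq t).trans hcond
        have hnoise := noise_of_not_cat_cond t hc hcond
        have hnB : noiseTermsB.contains t = PySem.Set.contains noiseWordsPy t := noise_eq t
        cases hT : (!PySem.Set.contains noiseWordsPy t && PySem.Str.len t > 2) with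
        | true =>
          have hTB : (!noiseTermsB.contains t && PySem.Str.len t > 2) = true := by rw [hnB]; exact hT
          simp only [List.foldl, List.filter, classifyPy, hg', hc, hcond, hcond', hnoise, hT, hTB,
            if_true, if_false, Bool.false_eq_true]
          exact ih _ _ _
        | false =>
          have hTB : (!noiseTermsB.contains t && PySem.Str.len t > 2) = false := by rw [hnB]; exact hT
          simp only [List.foldl, List.filter, classifyPy, hg', hc, hcond, hcond', hnoise, hT, hTB,
            if_false, Bool.false_eq_true]
          exact ih _ _ _

-- B's loop over raws is the classification fold over the normalised non-empty terms
lemma foldl_alt (terms : List String) (st : List String × List String × List String) :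
    terms.foldl (fun st raw =>
        let term := normalise_term_alt raw
        if term == "" then st else classifyPy st term) st =
      ((terms.map normalise_term_py).filter (fun t => t != "")).foldl classifyPy st := by
  induction terms generalizing st with
  | nil => rfl
  | cons a terms ih =>
    rw [List.foldl_cons, List.map_cons, List.filter_cons]
    simp only [normalise_alt_eq] at ih ⊢
    by_cases h : normalise_term_py a = ""
    · rw [h, if_pos (by rfl), if_neg (by decide)]
      exact ih st
    · have hb : (normalise_term_py a == "") = false := by simpa using h
      have hb2 : (normalise_term_py a != "") = true := by simp [bne, hb]
      rw [if_neg (by simp [hb]), if_pos hb2, List.foldl_cons]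
      exact ih _

-- ===== VERDICT (by name: the statement is the Claim_ definition above) =====
theorem extract_filter_terms_py_spec : Claim_equal_extract_filter_terms_py := by
  intro terms _
  show extract_filter_terms_py terms = extract_filter_terms_py_alt terms
  rw [extract_filter_terms_py_alt, foldl_alt, foldl_classify, extract_filter_terms_py]
  simp only [foldl_pushPy_nil]
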